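-- pv_equiv track=rewrite | github.com/joshua-mullet-town/whisper-village | ml/server.py | convert_list_style
-- ===== SOURCE A (Python) =====
-- def convert_list_style(text, style="bullets"):
--     """Convert bullet list to numbered list if requested."""
--     if style != "numbered":
--         return text
--
--     lines = text.split("\n")
--     result = []
--     num = 1
--     for line in lines:
--         if line.startswith("- "):
--             result.append(f"{num}. {line[2:]}")
--             num += 1
--         else:
--             result.append(line)
--             num = 1  # reset for next list
--     return "\n".join(result)
-- ===== SOURCE B (Python) =====
-- def convert_list_style(text, style="bullets"):
--     """Convert bullet list to numbered list if requested."""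
--     if style != "numbered":
--         return text
--
--     out = []
--     rest = text.split("\n")
--     while rest:
--         if rest[0].startswith("- "):
--             # collect the whole consecutive bullet run, then number it 1..k
--             run = []
--             while rest and rest[0].startswith("- "):
--                 run.append(rest.pop(0))
--             out += [f"{i}. {l[2:]}" for i, l in enumerate(run, 1)]
--         else:
--             out.append(rest.pop(0))
--     return "\n".join(out)
-- ===== Notes on version B (the rewrite author's own statement) =====
-- stated objective: alternative
-- what changed: Replaces A's single scan with a counter that resets on non-bullet lines by an explicit partition of the lines into maximal consecutive bullet runs, each run numbered independently via enumerate(run, 1).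
import Mathlib
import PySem

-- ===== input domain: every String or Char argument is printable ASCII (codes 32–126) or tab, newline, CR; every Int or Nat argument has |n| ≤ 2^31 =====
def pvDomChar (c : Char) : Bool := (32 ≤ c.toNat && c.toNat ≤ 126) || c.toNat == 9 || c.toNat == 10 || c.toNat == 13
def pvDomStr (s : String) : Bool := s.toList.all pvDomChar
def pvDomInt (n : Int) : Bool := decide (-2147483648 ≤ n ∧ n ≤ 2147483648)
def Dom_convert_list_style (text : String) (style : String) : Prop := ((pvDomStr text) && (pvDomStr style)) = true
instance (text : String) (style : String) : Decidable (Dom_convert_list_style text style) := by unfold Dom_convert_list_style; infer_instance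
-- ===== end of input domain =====

-- B replaces A's counter-with-reset single scan by an explicit partition into maximal
-- consecutive bullet runs, each numbered independently from 1 (objective: alternative).

-- ===== PORT A =====
-- one bullet line of A's loop: f"{num}. {line[2:]}"
def pvALine (num : Int) (line : String) : String :=
  PySem.Int.toStr num ++ ". " ++ PySem.Str.slice line (some 2) none

-- A's for-loop over the lines, carrying the counter `num`
def pvAAux : List String → Int → List String
  | [], _ => []
  | l :: rest, num =>
    if PySem.Str.startswith l "- " then pvALine num l :: pvAAux rest (num + 1)
    else l :: pvAAux rest 1

def convert_list_style (text : String) (style : String) : String :=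
  if style ≠ "numbered" then text
  else PySem.Str.join "\n" (pvAAux ((PySem.Str.split? text "\n").getD []) 1)

-- ===== PORT B =====
-- B's inner while loop: split off the maximal leading run of bullet lines
def pvSpanBullet : List String → List String × List String
  | [] => ([], [])
  | l :: rest =>
    if PySem.Str.startswith l "- " then
      let p := pvSpanBullet rest
      (l :: p.1, p.2)
    else ([], l :: rest)

lemma pvSpanBullet_snd_le (xs : List String) : (pvSpanBullet xs).2.length ≤ xs.length := by
  induction xs with
  | nil => simp [pvSpanBullet]
  | cons l rest ih =>
    simp only [pvSpanBullet]
    split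
    · simpa using Nat.le_succ_of_le ih
    · simp

-- B's comprehension: enumerate(run, 1) rendered as numbered lines
def pvNumber (run : List String) : List String :=
  (PySem.List.enumerate run 1).map
    (fun q => PySem.Int.toStr q.1 ++ ". " ++ PySem.Str.slice q.2 (some 2) none)

-- B's outer while loop over the remaining lines
def pvBAux : List String → List String
  | [] => []
  | l :: rest =>
    if PySem.Str.startswith l "- " then
      let p := pvSpanBullet rest
      pvNumber (l :: p.1) ++ pvBAux p.2
    else l :: pvBAux rest
termination_by xs => xs.length
decreasing_by
  · exact Nat.lt_succ_of_le (pvSpanBullet_snd_le rest)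
  · simp

def convert_list_style_alt (text : String) (style : String) : String :=
  if style ≠ "numbered" then text
  else PySem.Str.join "\n" (pvBAux ((PySem.Str.split? text "\n").getD []))

-- ===== PRECONDITION & SPEC =====
def Spec_convert_list_style (text : String) (style : String) (out : String) : Prop := out = convert_list_style_alt text style
instance (text : String) (style : String) (out : String) : Decidable (Spec_convert_list_style text style out) := by unfold Spec_convert_list_style; infer_instance

-- ===== CLAIM (what is proved, stated in full; the proofs are below) =====
def Claim_equal_convert_list_style : Prop := ∀ (text : String) (style : String), Dom_convert_list_style text style → Spec_convert_list_style text style (convert_list_style text style)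

-- ===== LEMMAS AND PROOFS =====

-- proof-only view of B's numbering: number a run of bullet lines starting at n
def pvNumFrom : Int → List String → List String
  | _, [] => []
  | n, l :: t => pvALine n l :: pvNumFrom (n + 1) t

lemma pvNumber_eq_numFrom (run : List String) (n : Int) :
    (PySem.List.enumerate run n).map
      (fun q => PySem.Int.toStr q.1 ++ ". " ++ PySem.Str.slice q.2 (some 2) none)
      = pvNumFrom n run := by
  induction run generalizing n with
  | nil => simp [pvNumFrom, PySem.List.enumerate_nil]
  | cons l t ih => simp [pvNumFrom, PySem.List.enumerate_cons, pvALine, ih]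

-- A's loop over any list factors through its leading bullet run
lemma pvAAux_span (xs : List String) (n : Int) :
    pvAAux xs n = pvNumFrom n (pvSpanBullet xs).1 ++ pvAAux (pvSpanBullet xs).2 1 := by
  induction xs generalizing n with
  | nil => simp [pvAAux, pvSpanBullet, pvNumFrom]
  | cons l rest ih =>
    by_cases h : PySem.Str.startswith l "- "
    · rw [pvAAux, pvSpanBullet]
      simp only [h, if_pos, pvNumFrom, ih (n + 1)]
      simp
    · rw [pvAAux, pvSpanBullet]
      simp only [h, if_neg, Bool.false_eq_true, not_false_iff]
      simp [pvNumFrom]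
      rw [pvAAux]
      simp
      intro hc
      exact absurd hc (by simpa using h)

lemma pvAAux_eq_pvBAux (k : Nat) : ∀ xs : List String, xs.length ≤ k → pvAAux xs 1 = pvBAux xs := by
  induction k with
  | zero => intro xs h; simp at h; simp [h, pvAAux, pvBAux]
  | succ k ih =>
    intro xs h
    match xs with
    | [] => simp [pvAAux, pvBAux]
    | l :: rest =>
      by_cases hb : PySem.Str.startswith l "- "
      · rw [pvAAux_span, pvBAux]
        simp only [hb, if_pos, pvSpanBullet, pvNumber, pvNumber_eq_numFrom]
        rw [ih (pvSpanBullet rest).2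
          (le_trans (pvSpanBullet_snd_le rest) (by simpa using Nat.le_of_succ_le_succ h))]
      · rw [pvAAux, pvBAux]
        simp only [hb, if_neg, Bool.false_eq_true, not_false_iff]
        rw [ih rest (by simpa using Nat.le_of_succ_le_succ h)]

-- ===== VERDICT (by name: the statement is the Claim_ definition above) =====
theorem convert_list_style_spec : Claim_equal_convert_list_style := by
  intro text style _
  unfold Spec_convert_list_style convert_list_style convert_list_style_alt
  split
  · rfl
  · rw [pvAAux_eq_pvBAux ((PySem.Str.split? text "\n").getD []).length _ le_rfl]
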